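-- pv_equiv track=rewrite | github.com/moyasui/Quanthon | Quanthon/Mapper.py | get_tb_base
-- ===== SOURCE A (Python) =====
-- def get_tb_base(n,ordered_indices):
--
--     # get the I's and the Z's for the qubits not acted on.
--     tb_op_base = list(n * 'I')
--
--     for i in range(n):
--         if i in ordered_indices:
--             continue
--
--         if ordered_indices[0] < i < ordered_indices[1]:
--             tb_op_base[i] = 'Z'
--
--         if ordered_indices[2] < i < ordered_indices[3]:
--             tb_op_base[i] = 'Z'
--
--     return tb_op_base
-- ===== SOURCE B (Python) =====
-- def get_tb_base(n, ordered_indices):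
--     tb = list(n * 'I')
--     if not tb:
--         return tb
--     spans = ((ordered_indices[0], ordered_indices[1]),
--              (ordered_indices[2], ordered_indices[3]))
--     for lo, hi in spans:
--         for i in range(max(lo + 1, 0), min(hi, n)):
--             if i not in ordered_indices:
--                 tb[i] = 'Z'
--     return tb
-- ===== Notes on version B (the rewrite author's own statement) =====
-- stated objective: alternative
-- what changed: B walks only the two clamped Z-spans (plus a membership test) instead of scanning every index 0..n-1 against both intervals.
-- outside the precondition, e.g. on get_tb_base(2, [0, 1]): A returns ['I', 'I'], B raises IndexError
import Mathlib
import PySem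

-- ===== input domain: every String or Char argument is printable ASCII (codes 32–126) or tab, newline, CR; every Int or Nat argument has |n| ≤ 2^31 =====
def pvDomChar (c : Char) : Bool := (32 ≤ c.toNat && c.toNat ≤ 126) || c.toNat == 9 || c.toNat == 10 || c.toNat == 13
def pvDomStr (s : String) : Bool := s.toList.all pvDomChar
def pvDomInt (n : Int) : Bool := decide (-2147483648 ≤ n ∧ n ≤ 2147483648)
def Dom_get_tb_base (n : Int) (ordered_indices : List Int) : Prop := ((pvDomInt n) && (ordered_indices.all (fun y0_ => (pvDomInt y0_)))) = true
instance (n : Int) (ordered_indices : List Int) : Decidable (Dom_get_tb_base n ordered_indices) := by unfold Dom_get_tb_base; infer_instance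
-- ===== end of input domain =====

-- B walks only the two clamped Z-spans instead of testing every index 0..n-1 against both intervals (alternative decomposition, similar cost).


-- ===== PORT A =====
-- ordered_indices[k] is ported as pyGetD … 0, exact under Pre_ (there the list has ≥ 4 elements whenever the loop runs).
def get_tb_base (n : Int) (ordered_indices : List Int) : List String :=
  let tb_op_base := List.replicate n.toNat "I"   -- list(n * 'I'): '' for n ≤ 0
  (PySem.List.pyRange 0 n 1).foldl (fun tb i =>
    if ordered_indices.contains i then tb
    else
      let tb := if PySem.List.pyGetD ordered_indices 0 0 < i ∧ i < PySem.List.pyGetD ordered_indices 1 0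
                then PySem.List.pySetD tb i "Z" else tb
      if PySem.List.pyGetD ordered_indices 2 0 < i ∧ i < PySem.List.pyGetD ordered_indices 3 0
      then PySem.List.pySetD tb i "Z" else tb) tb_op_base

-- ===== PORT B =====
-- one clamped span loop of Source B: for i in range(max(lo+1,0), min(hi,n)): if i not in ordered_indices: tb[i]='Z'
def altSpan (ordered_indices : List Int) (n lo hi : Int) (tb : List String) : List String :=
  (PySem.List.pyRange (max (lo + 1) 0) (min hi n) 1).foldl
    (fun tb i => if ordered_indices.contains i then tb else PySem.List.pySetD tb i "Z") tb

def get_tb_base_alt (n : Int) (ordered_indices : List Int) : List String :=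
  let tb := List.replicate n.toNat "I"
  if tb.isEmpty then tb
  else
    let tb := altSpan ordered_indices n (PySem.List.pyGetD ordered_indices 0 0) (PySem.List.pyGetD ordered_indices 1 0) tb
    altSpan ordered_indices n (PySem.List.pyGetD ordered_indices 2 0) (PySem.List.pyGetD ordered_indices 3 0) tb

-- ===== PRECONDITION & SPEC =====
-- Pre_ excludes inputs with n ≥ 1 and fewer than 4 indices: A raises IndexError on ordered_indices[k] unless
-- every i in range(n) happens to be a member (then A returns, but B raises IndexError there — see cites).
def Pre_get_tb_base (n : Int) (ordered_indices : List Int) : Prop := n ≤ 0 ∨ 4 ≤ ordered_indices.length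
instance (n : Int) (ordered_indices : List Int) : Decidable (Pre_get_tb_base n ordered_indices) := by unfold Pre_get_tb_base; infer_instance
def pvWitness_get_tb_base : Int × List Int := (5, [0, 2, 3, 4])
def Spec_get_tb_base (n : Int) (ordered_indices : List Int) (out : List String) : Prop := out = get_tb_base_alt n ordered_indices
instance (n : Int) (ordered_indices : List Int) (out : List String) : Decidable (Spec_get_tb_base n ordered_indices out) := by unfold Spec_get_tb_base; infer_instance

-- ===== CLAIM (what is proved, stated in full; the proofs are below) =====
def Claim_equal_get_tb_base : Prop := ∀ (n : Int) (ordered_indices : List Int), Dom_get_tb_base n ordered_indices → Pre_get_tb_base n ordered_indices → Spec_get_tb_base n ordered_indices (get_tb_base n ordered_indices)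

-- ===== LEMMAS AND PROOFS =====

-- common loop-body shape of both folds: conditionally write "Z" at index i
def stepZ (p : Int → Bool) (t : List String) (i : Int) : List String :=
  if p i then PySem.List.pySetD t i "Z" else t

theorem foldl_stepZ_length (l : List Int) (p : Int → Bool) (tb : List String) :
    (l.foldl (stepZ p) tb).length = tb.length := by
  induction l generalizing tb with
  | nil => rfl
  | cons i rest ih =>
      rw [List.foldl_cons, ih]
      unfold stepZ
      split <;> simp [PySem.List.length_pySetD]

-- Element j of such a fold: "Z" iff some i in l with p i hits j, else the original entry.
theorem foldl_stepZ_getD (l : List Int) (p : Int → Bool) (tb : List String) (j : Nat)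
    (hl : ∀ i ∈ l, 0 ≤ i) (hj : j < tb.length) :
    (l.foldl (stepZ p) tb).getD j "" =
      if l.any (fun i => p i && i == (j : Int)) then "Z" else tb.getD j "" := by
  induction l generalizing tb with
  | nil => simp
  | cons i rest ih =>
      have hi : 0 ≤ i := hl i (by simp)
      have hrest : ∀ x ∈ rest, 0 ≤ x := fun x hx => hl x (by simp [hx])
      rw [List.foldl_cons]
      by_cases hp : p i = true
      · have hstep : stepZ p tb i = PySem.List.pySetD tb i "Z" := by simp [stepZ, hp]
        rw [hstep, ih _ hrest (by rw [PySem.List.length_pySetD]; exact hj)]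
        by_cases hr : rest.any (fun i => p i && i == (j : Int)) = true
        · simp [hr]
        · rw [PySem.List.pySetD_of_nonneg _ _ hi]
          simp only [List.any_cons, hr, Bool.or_false, hp, Bool.true_and]
          rw [List.getD_eq_getElem?_getD, List.getD_eq_getElem?_getD, List.getElem?_set]
          by_cases he : i = (j : Int)
          · have ht : i.toNat = j := by omega
            simp [he, hj]
          · have ht : i.toNat ≠ j := by omega
            simp [he, ht]
      · have hstep : stepZ p tb i = tb := by simp [stepZ, hp]
        rw [hstep, ih _ hrest hj]
        simp [hp]

-- A's loop body agrees, on nonnegative i, with the stepZ shape.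
def pA (ordered_indices : List Int) (i : Int) : Bool :=
  !ordered_indices.contains i &&
    ((decide (PySem.List.pyGetD ordered_indices 0 0 < i) && decide (i < PySem.List.pyGetD ordered_indices 1 0)) ||
     (decide (PySem.List.pyGetD ordered_indices 2 0 < i) && decide (i < PySem.List.pyGetD ordered_indices 3 0)))

theorem A_fold_eq (n : Int) (oi : List Int) :
    get_tb_base n oi =
      (PySem.List.pyRange 0 n 1).foldl (stepZ (pA oi)) (List.replicate n.toNat "I") := by
  unfold get_tb_base
  apply PySem.List.foldl_congr_mem
  intro t i hi
  have h0 : 0 ≤ i := (PySem.List.mem_pyRange_one.mp hi).1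
  by_cases hc : i ∈ oi
  · simp [stepZ, pA, hc, List.contains_eq_mem]
  · have hcb : oi.contains i = false := by
      simp [List.contains_eq_mem, hc]
    by_cases h1 : PySem.List.pyGetD oi 0 0 < i ∧ i < PySem.List.pyGetD oi 1 0 <;>
    by_cases h2 : PySem.List.pyGetD oi 2 0 < i ∧ i < PySem.List.pyGetD oi 3 0 <;>
    · simp only [stepZ, pA, hcb, Bool.not_false, Bool.true_and]
      simp [h1, h2, PySem.List.pySetD_of_nonneg _ _ h0, List.set_set]
      try tauto

-- B's loop body is the stepZ shape with the bare membership test.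
theorem B_step_eq (oi : List Int) :
    (fun (tb : List String) (i : Int) =>
        if oi.contains i then tb else PySem.List.pySetD tb i "Z") =
      stepZ (fun i => !oi.contains i) := by
  funext t i
  by_cases h : i ∈ oi <;> simp [stepZ, h, List.contains_eq_mem]

theorem get_tb_base_eq_alt (n : Int) (oi : List Int) : get_tb_base n oi = get_tb_base_alt n oi := by
  by_cases hn : n ≤ 0
  · have h0 : n.toNat = 0 := by omega
    unfold get_tb_base get_tb_base_alt
    rw [PySem.List.pyRange_one_eq_nil hn]
    simp [h0]
  · replace hn : 0 < n := by omega
    have hne : (List.replicate n.toNat "I").isEmpty = false := by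
      simp
      omega
    have hB : get_tb_base_alt n oi =
        (PySem.List.pyRange (max (PySem.List.pyGetD oi 2 0 + 1) 0) (min (PySem.List.pyGetD oi 3 0) n) 1).foldl
          (stepZ (fun i => !oi.contains i))
          ((PySem.List.pyRange (max (PySem.List.pyGetD oi 0 0 + 1) 0) (min (PySem.List.pyGetD oi 1 0) n) 1).foldl
            (stepZ (fun i => !oi.contains i))
            (List.replicate n.toNat "I")) := by
      simp only [get_tb_base_alt, altSpan]
      rw [B_step_eq]
      simp only [hne, Bool.false_eq_true, if_false]
    have hrange : ∀ a b : Int, ∀ i ∈ PySem.List.pyRange (max (a + 1) 0) (min b n) 1, 0 ≤ i := by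
      intro a b i hi
      have := (PySem.List.mem_pyRange_one.mp hi).1
      omega
    have hrange0 : ∀ i ∈ PySem.List.pyRange 0 n 1, 0 ≤ i := by
      intro i hi; exact (PySem.List.mem_pyRange_one.mp hi).1
    rw [A_fold_eq, hB]
    apply List.ext_getElem
    · rw [foldl_stepZ_length, foldl_stepZ_length, foldl_stepZ_length]
    · intro j hjA hjB
      have hj : j < (List.replicate n.toNat "I").length := by
        rwa [foldl_stepZ_length] at hjA
      have hjn : (j : Int) < n := by
        simp only [List.length_replicate] at hj; omega
      rw [← List.getD_eq_getElem _ "" hjA, ← List.getD_eq_getElem _ "" hjB]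
      rw [foldl_stepZ_getD _ _ _ _ hrange0 hj,
          foldl_stepZ_getD _ _ _ _ (hrange _ _) (by rw [foldl_stepZ_length]; exact hj),
          foldl_stepZ_getD _ _ _ _ (hrange _ _) hj]
      have hmem : ∀ (p : Int → Bool) (a b : Int),
          (PySem.List.pyRange a b 1).any (fun i => p i && i == (j : Int)) =
            (decide (a ≤ (j:Int) ∧ (j:Int) < b) && p j) := by
        intro p a b
        by_cases hab : a ≤ (j:Int) ∧ (j:Int) < b
        · have hmemj : (j:Int) ∈ PySem.List.pyRange a b 1 := PySem.List.mem_pyRange_one.mpr hab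
          by_cases hp : p j = true
          · have : (PySem.List.pyRange a b 1).any (fun i => p i && i == (j:Int)) = true :=
              List.any_eq_true.mpr ⟨(j:Int), hmemj, by simp [hp]⟩
            simp [this, hab, hp]
          · have : (PySem.List.pyRange a b 1).any (fun i => p i && i == (j:Int)) = false := by
              rw [List.any_eq_false]
              intro i hi
              simp only [Bool.and_eq_true, beq_iff_eq, not_and]
              intro hpi he
              exact absurd (he ▸ hpi) hp
            simp [this, hab, hp]
        · have : (PySem.List.pyRange a b 1).any (fun i => p i && i == (j:Int)) = false := by
            rw [List.any_eq_false]
            intro i hi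
            simp only [Bool.and_eq_true, beq_iff_eq, not_and]
            intro _ he
            exact hab (he ▸ PySem.List.mem_pyRange_one.mp hi)
          simp [this, hab]
      rw [hmem, hmem, hmem]
      have d0 : decide ((0:Int) ≤ (j:Int) ∧ (j:Int) < n) = true := by
        simp
        omega
      have d1 : decide (max (PySem.List.pyGetD oi 0 0 + 1) 0 ≤ (j:Int) ∧ (j:Int) < min (PySem.List.pyGetD oi 1 0) n) =
          decide (PySem.List.pyGetD oi 0 0 < (j:Int) ∧ (j:Int) < PySem.List.pyGetD oi 1 0) := by
        apply decide_eq_decide.mpr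
        omega
      have d2 : decide (max (PySem.List.pyGetD oi 2 0 + 1) 0 ≤ (j:Int) ∧ (j:Int) < min (PySem.List.pyGetD oi 3 0) n) =
          decide (PySem.List.pyGetD oi 2 0 < (j:Int) ∧ (j:Int) < PySem.List.pyGetD oi 3 0) := by
        apply decide_eq_decide.mpr
        omega
      rw [d0, d1, d2]
      simp only [pA, Bool.true_and, Bool.decide_and]
      by_cases hc : (j:Int) ∈ oi <;>
        by_cases h1a : PySem.List.pyGetD oi 0 0 < (j:Int) <;>
        by_cases h1b : (j:Int) < PySem.List.pyGetD oi 1 0 <;>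
        by_cases h2a : PySem.List.pyGetD oi 2 0 < (j:Int) <;>
        by_cases h2b : (j:Int) < PySem.List.pyGetD oi 3 0 <;>
        simp [hc, h1a, h1b, h2a, h2b, List.contains_eq_mem]

-- ===== VERDICT (by name: the statement is the Claim_ definition above) =====
theorem get_tb_base_spec : Claim_equal_get_tb_base := by
  intro n oi _ _
  unfold Spec_get_tb_base
  exact get_tb_base_eq_alt n oi
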